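-- pv_equiv track=rewrite | github.com/MoAminPourzare/AI-Genetic-Algorithm | codes/main.py | calcTwoAdjacentSides
-- ===== SOURCE A (Python) =====
-- def calcTwoAdjacentSides(mainMoves, minorMoves):
--     counter = 0
--     for i in range(0, len(mainMoves) - 1):
--         for j in range(i + 1, len(mainMoves)):
--             if ((mainMoves[i][0] == mainMoves[j][0] and mainMoves[i][1] != mainMoves[j][1] and (((mainMoves[i][1], mainMoves[j][1]) in minorMoves) or ((mainMoves[j][1], mainMoves[i][1]) in minorMoves)))
--             or (mainMoves[i][1] == mainMoves[j][1] and mainMoves[i][0] != mainMoves[j][0] and (((mainMoves[i][0], mainMoves[j][0]) in minorMoves) or ((mainMoves[j][0], mainMoves[i][0]) in minorMoves)))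
--             or (mainMoves[i][0] == mainMoves[j][1] and mainMoves[i][1] != mainMoves[j][0] and (((mainMoves[i][1], mainMoves[j][0]) in minorMoves) or ((mainMoves[j][0], mainMoves[i][1]) in minorMoves)))
--             or (mainMoves[i][1] == mainMoves[j][0] and mainMoves[i][0] != mainMoves[j][1] and (((mainMoves[i][0], mainMoves[j][1]) in minorMoves) or ((mainMoves[j][1], mainMoves[i][0]) in minorMoves)))):
--                 counter = counter + 1
--     return counter
-- ===== SOURCE B (Python) =====
-- def calcTwoAdjacentSides(mainMoves, minorMoves):
--     minor = set(minorMoves)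
--     # index main edges by endpoint: vertex -> list of (position, other endpoint)
--     buckets = {}
--     for idx, (a, b) in enumerate(mainMoves):
--         buckets.setdefault(a, []).append((idx, b))
--         if b != a:
--             buckets.setdefault(b, []).append((idx, a))
--     # within each bucket the positions are increasing; collect each qualifying
--     # pair of positions once (a pair may share two vertices)
--     counted = set()
--     for entries in buckets.values():
--         rest = entries
--         while rest:
--             (i, x), rest = rest[0], rest[1:]
--             for (j, y) in rest:
--                 if x != y and ((x, y) in minor or (y, x) in minor):
--                     counted.add((i, j))
--     return len(counted)
-- ===== Notes on version B (the rewrite author's own statement) =====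
-- stated objective: faster
-- what changed: Instead of scanning all O(n^2) main-edge pairs and doing a linear 'in minorMoves' list scan for each, B indexes main edges by endpoint into vertex buckets, compares only edges sharing a vertex, checks minor-edge membership in a prebuilt set, and dedupes qualifying index pairs in a set.
import Mathlib
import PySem

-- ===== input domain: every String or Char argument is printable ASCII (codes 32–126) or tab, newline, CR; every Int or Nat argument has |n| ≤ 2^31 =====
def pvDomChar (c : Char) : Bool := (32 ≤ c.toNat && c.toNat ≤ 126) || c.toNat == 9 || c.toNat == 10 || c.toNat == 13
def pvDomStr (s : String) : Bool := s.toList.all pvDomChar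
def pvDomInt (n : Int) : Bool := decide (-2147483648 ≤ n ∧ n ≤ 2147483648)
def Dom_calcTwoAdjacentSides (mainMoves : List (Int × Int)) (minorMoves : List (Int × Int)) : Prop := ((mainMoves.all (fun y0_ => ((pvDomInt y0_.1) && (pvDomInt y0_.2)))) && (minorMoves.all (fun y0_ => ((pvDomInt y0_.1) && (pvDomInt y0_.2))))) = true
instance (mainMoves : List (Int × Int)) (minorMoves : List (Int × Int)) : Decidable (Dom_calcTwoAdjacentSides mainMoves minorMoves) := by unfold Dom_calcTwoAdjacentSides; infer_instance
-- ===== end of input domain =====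

-- B replaces A's scan of all O(n^2) main-edge pairs (each with linear 'in minorMoves' list scans)
-- by vertex buckets: edges are indexed by endpoint, only edges sharing a vertex are compared,
-- minor membership is a set lookup, and qualifying index pairs are deduplicated in a set.

-- B replaces A's scan of all pairs of main edges (each membership test a linear list scan)
-- by vertex buckets: edges indexed by endpoint, only edges sharing a vertex compared, minor
-- membership a set lookup, qualifying index pairs deduplicated in a set. Objective: faster.

-- ===== PORT A =====
def calcTwoAdjacentSides (mainMoves : List (Int × Int)) (minorMoves : List (Int × Int)) : Int :=
  (PySem.List.pyRange 0 ((mainMoves.length : Int) - 1) 1).foldl (fun counter i =>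
    (PySem.List.pyRange (i + 1) (mainMoves.length : Int) 1).foldl (fun counter j =>
      if ((PySem.List.pyGetD mainMoves i (0, 0)).1 == (PySem.List.pyGetD mainMoves j (0, 0)).1 && (PySem.List.pyGetD mainMoves i (0, 0)).2 != (PySem.List.pyGetD mainMoves j (0, 0)).2 && (minorMoves.contains ((PySem.List.pyGetD mainMoves i (0, 0)).2, (PySem.List.pyGetD mainMoves j (0, 0)).2) || minorMoves.contains ((PySem.List.pyGetD mainMoves j (0, 0)).2, (PySem.List.pyGetD mainMoves i (0, 0)).2)))
        || ((PySem.List.pyGetD mainMoves i (0, 0)).2 == (PySem.List.pyGetD mainMoves j (0, 0)).2 && (PySem.List.pyGetD mainMoves i (0, 0)).1 != (PySem.List.pyGetD mainMoves j (0, 0)).1 && (minorMoves.contains ((PySem.List.pyGetD mainMoves i (0, 0)).1, (PySem.List.pyGetD mainMoves j (0, 0)).1) || minorMoves.contains ((PySem.List.pyGetD mainMoves j (0, 0)).1, (PySem.List.pyGetD mainMoves i (0, 0)).1)))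
        || ((PySem.List.pyGetD mainMoves i (0, 0)).1 == (PySem.List.pyGetD mainMoves j (0, 0)).2 && (PySem.List.pyGetD mainMoves i (0, 0)).2 != (PySem.List.pyGetD mainMoves j (0, 0)).1 && (minorMoves.contains ((PySem.List.pyGetD mainMoves i (0, 0)).2, (PySem.List.pyGetD mainMoves j (0, 0)).1) || minorMoves.contains ((PySem.List.pyGetD mainMoves j (0, 0)).1, (PySem.List.pyGetD mainMoves i (0, 0)).2)))
        || ((PySem.List.pyGetD mainMoves i (0, 0)).2 == (PySem.List.pyGetD mainMoves j (0, 0)).1 && (PySem.List.pyGetD mainMoves i (0, 0)).1 != (PySem.List.pyGetD mainMoves j (0, 0)).2 && (minorMoves.contains ((PySem.List.pyGetD mainMoves i (0, 0)).1, (PySem.List.pyGetD mainMoves j (0, 0)).2) || minorMoves.contains ((PySem.List.pyGetD mainMoves j (0, 0)).2, (PySem.List.pyGetD mainMoves i (0, 0)).1)))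
      then counter + 1 else counter) counter) 0

-- ===== PORT B =====  (transliteration of Source B)
def pvLinked (minor : PySem.Set (Int × Int)) (x y : Int) : Bool :=
  x != y && (PySem.Set.contains minor (x, y) || PySem.Set.contains minor (y, x))

def pvBuckets (mainMoves : List (Int × Int)) : PySem.Dict Int (List (Int × Int)) :=
  (PySem.List.enumerate mainMoves).foldl (fun d p =>
    let d1 := d.modify p.2.1 [] (fun l => l ++ [(p.1, p.2.2)])
    if p.2.2 != p.2.1 then d1.modify p.2.2 [] (fun l => l ++ [(p.1, p.2.1)]) else d1)
    PySem.Dict.empty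

def pvScanBucket (minor : PySem.Set (Int × Int)) (entries : List (Int × Int))
    (counted : PySem.Set (Int × Int)) : PySem.Set (Int × Int) :=
  match entries with
  | [] => counted
  | (i, x) :: rest =>
      pvScanBucket minor rest
        (rest.foldl (fun s q => if pvLinked minor x q.2 then PySem.Set.add s (i, q.1) else s) counted)

def calcTwoAdjacentSides_alt (mainMoves : List (Int × Int)) (minorMoves : List (Int × Int)) : Int :=
  let minor := PySem.Set.ofList minorMoves
  let counted := (pvBuckets mainMoves).values.foldl
    (fun s entries => pvScanBucket minor entries s) PySem.Set.empty
  PySem.Set.len counted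

-- ===== PRECONDITION & SPEC =====
def Spec_calcTwoAdjacentSides (mainMoves : List (Int × Int)) (minorMoves : List (Int × Int)) (out : Int) : Prop := out = calcTwoAdjacentSides_alt mainMoves minorMoves
instance (mainMoves : List (Int × Int)) (minorMoves : List (Int × Int)) (out : Int) : Decidable (Spec_calcTwoAdjacentSides mainMoves minorMoves out) := by unfold Spec_calcTwoAdjacentSides; infer_instance

-- ===== CLAIM (what is proved, stated in full; the proofs are below) =====
def Claim_equal_calcTwoAdjacentSides : Prop := ∀ (mainMoves : List (Int × Int)) (minorMoves : List (Int × Int)), Dom_calcTwoAdjacentSides mainMoves minorMoves → Spec_calcTwoAdjacentSides mainMoves minorMoves (calcTwoAdjacentSides mainMoves minorMoves)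

-- ===== LEMMAS AND PROOFS =====

def pvP (mn : List (Int × Int)) (e f : Int × Int) : Bool :=
  (e.1 == f.1 && e.2 != f.2 && (mn.contains (e.2, f.2) || mn.contains (f.2, e.2)))
  || (e.2 == f.2 && e.1 != f.1 && (mn.contains (e.1, f.1) || mn.contains (f.1, e.1)))
  || (e.1 == f.2 && e.2 != f.1 && (mn.contains (e.2, f.1) || mn.contains (f.1, e.2)))
  || (e.2 == f.1 && e.1 != f.2 && (mn.contains (e.1, f.2) || mn.contains (f.2, e.1)))

def pvGoodPair (mm mn : List (Int × Int)) (p : Int × Int) : Prop :=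
  ∃ (i j : Nat) (_ : i < mm.length) (_ : j < mm.length),
    i < j ∧ pvP mn mm[i] mm[j] = true ∧ p = ((i : Int), (j : Int))

def pvBucketOf (mm : List (Int × Int)) (v : Int) : List (Int × Int) :=
  (PySem.List.enumerate mm).flatMap (fun q =>
    (if q.2.1 = v then [(q.1, q.2.2)] else []) ++
    (if q.2.2 = v ∧ q.2.2 ≠ q.2.1 then [(q.1, q.2.1)] else []))

def pvSB (minor : PySem.Set (Int × Int)) (entries : List (Int × Int)) (p : Int × Int) : Prop :=
  ∃ (k l : Nat) (_ : k < entries.length) (_ : l < entries.length),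
    k < l ∧ pvLinked minor (entries[k]).2 (entries[l]).2 = true ∧
      p = ((entries[k]).1, (entries[l]).1)

-- (1) membership through the inner 'for (j, y) in rest' fold
theorem pv_mem_foldl_add {β : Type} (l : List β) (c : β → Bool) (g : β → Int × Int)
    (s : PySem.Set (Int × Int)) (p : Int × Int) :
    (p ∈ l.foldl (fun s q => if c q then PySem.Set.add s (g q) else s) s) ↔
      p ∈ s ∨ ∃ q ∈ l, c q = true ∧ p = g q := by
  induction l generalizing s with
  | nil => simp
  | cons a t ih =>
    simp only [List.foldl_cons]
    by_cases h : c a = true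
    · rw [ih]; simp [h, PySem.Set.mem_add]; tauto
    · rw [ih]; simp [h]

-- (2) nodup through the fold
theorem pv_nodup_foldl_add {β : Type} (l : List β) (c : β → Bool) (g : β → Int × Int)
    (s : PySem.Set (Int × Int)) (hs : s.Nodup) :
    (l.foldl (fun s q => if c q then PySem.Set.add s (g q) else s) s).Nodup := by
  induction l generalizing s with
  | nil => exact hs
  | cons a t ih =>
    simp only [List.foldl_cons]
    by_cases h : c a = true
    · simp only [h, if_true]; exact ih _ (PySem.Set.nodup_add _ _ hs)
    · simp only [h]; exact ih _ hs

-- (3) membership through one bucket scan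
theorem pv_mem_scanBucket (minor : PySem.Set (Int × Int)) (entries : List (Int × Int))
    (s : PySem.Set (Int × Int)) (p : Int × Int) :
    p ∈ pvScanBucket minor entries s ↔ p ∈ s ∨ pvSB minor entries p := by
  induction entries generalizing s with
  | nil => simp [pvScanBucket, pvSB]
  | cons a t ih =>
    obtain ⟨i, x⟩ := a
    rw [pvScanBucket, ih, pv_mem_foldl_add]
    constructor
    · rintro ((hp | ⟨q, hq, hc, rfl⟩) | hsb)
      · exact Or.inl hp
      · obtain ⟨l, hl, rfl⟩ := List.mem_iff_getElem.1 hq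
        exact Or.inr ⟨0, l + 1, by simp, by simp [hl], by omega, by simpa using hc, by simp⟩
      · obtain ⟨k, l, hk, hl, hkl, hc, rfl⟩ := hsb
        exact Or.inr ⟨k + 1, l + 1, by simpa using hk, by simpa using hl, by omega,
          by simpa using hc, by simp⟩
    · rintro (hp | ⟨k, l, hk, hl, hkl, hc, rfl⟩)
      · exact Or.inl (Or.inl hp)
      · match k, l with
        | 0, l + 1 =>
          have hl' : l < t.length := by simpa using hl
          refine Or.inl (Or.inr ⟨t[l], List.getElem_mem _, ?_, ?_⟩)
          · simpa using hc
          · simp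
        | k + 1, l + 1 =>
          exact Or.inr ⟨k, l, by simpa using hk, by simpa using hl, by omega,
            by simpa using hc, by simp⟩

theorem pv_nodup_scanBucket (minor : PySem.Set (Int × Int)) (entries : List (Int × Int))
    (s : PySem.Set (Int × Int)) (hs : s.Nodup) : (pvScanBucket minor entries s).Nodup := by
  induction entries generalizing s with
  | nil => exact hs
  | cons a t ih =>
    obtain ⟨i, x⟩ := a
    rw [pvScanBucket]
    exact ih _ (pv_nodup_foldl_add _ _ _ _ hs)

-- (4) membership through the fold over all buckets
theorem pv_mem_foldl_scan (minor : PySem.Set (Int × Int)) (vs : List (List (Int × Int)))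
    (s : PySem.Set (Int × Int)) (p : Int × Int) :
    p ∈ vs.foldl (fun s e => pvScanBucket minor e s) s ↔
      p ∈ s ∨ ∃ e ∈ vs, pvSB minor e p := by
  induction vs generalizing s with
  | nil => simp
  | cons a t ih =>
    simp only [List.foldl_cons]
    rw [ih, pv_mem_scanBucket]
    simp only [List.mem_cons]
    constructor
    · rintro ((h | h) | ⟨e, he, hsb⟩)
      · exact Or.inl h
      · exact Or.inr ⟨a, Or.inl rfl, h⟩
      · exact Or.inr ⟨e, Or.inr he, hsb⟩
    · rintro (h | ⟨e, (rfl | he), hsb⟩)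
      · exact Or.inl (Or.inl h)
      · exact Or.inl (Or.inr hsb)
      · exact Or.inr ⟨e, he, hsb⟩

theorem pv_nodup_foldl_scan (minor : PySem.Set (Int × Int)) (vs : List (List (Int × Int)))
    (s : PySem.Set (Int × Int)) (hs : s.Nodup) :
    (vs.foldl (fun s e => pvScanBucket minor e s) s).Nodup := by
  induction vs generalizing s with
  | nil => exact hs
  | cons a t ih => exact ih _ (pv_nodup_scanBucket _ _ _ hs)

-- (5) contents of one bucket after the building fold
theorem pv_getD_bfold (l : List (Int × (Int × Int))) (d : PySem.Dict Int (List (Int × Int)))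
    (v : Int) :
    (l.foldl (fun d p =>
      let d1 := d.modify p.2.1 [] (fun l => l ++ [(p.1, p.2.2)])
      if p.2.2 != p.2.1 then d1.modify p.2.2 [] (fun l => l ++ [(p.1, p.2.1)]) else d1) d).getD v []
    = d.getD v [] ++ l.flatMap (fun q =>
        (if q.2.1 = v then [(q.1, q.2.2)] else []) ++
        (if q.2.2 = v ∧ q.2.2 ≠ q.2.1 then [(q.1, q.2.1)] else [])) := by
  induction l generalizing d with
  | nil => simp
  | cons a t ih =>
    simp only [List.foldl_cons, List.flatMap_cons]
    rw [ih]
    by_cases h1 : a.2.2 = a.2.1 <;>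
      by_cases h2 : a.2.1 = v <;>
        by_cases h3 : a.2.2 = v <;>
          simp [h1, h2, h3, PySem.Dict.getD_modify, bne, @eq_comm _ v]

-- (6) which keys the building fold creates
theorem pv_mem_keys_bfold (l : List (Int × (Int × Int))) (d : PySem.Dict Int (List (Int × Int)))
    (v : Int) :
    v ∈ (l.foldl (fun d p =>
      let d1 := d.modify p.2.1 [] (fun l => l ++ [(p.1, p.2.2)])
      if p.2.2 != p.2.1 then d1.modify p.2.2 [] (fun l => l ++ [(p.1, p.2.1)]) else d1) d).keys
    ↔ v ∈ d.keys ∨ ∃ q ∈ l, v = q.2.1 ∨ v = q.2.2 := by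
  induction l generalizing d with
  | nil => simp
  | cons a t ih =>
    simp only [List.foldl_cons]
    rw [ih]
    by_cases h1 : a.2.2 = a.2.1 <;>
      simp [h1, bne, PySem.Dict.keys_modify, PySem.Dict.mem_keys_insert] <;> aesop

-- (7) keys stay nodup
theorem pv_nodup_keys_bfold (l : List (Int × (Int × Int))) (d : PySem.Dict Int (List (Int × Int)))
    (hd : d.keys.Nodup) :
    (l.foldl (fun d p =>
      let d1 := d.modify p.2.1 [] (fun l => l ++ [(p.1, p.2.2)])
      if p.2.2 != p.2.1 then d1.modify p.2.2 [] (fun l => l ++ [(p.1, p.2.1)]) else d1) d).keys.Nodup := by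
  induction l generalizing d with
  | nil => exact hd
  | cons a t ih =>
    simp only [List.foldl_cons]
    apply ih
    by_cases h1 : a.2.2 = a.2.1
    · rw [if_neg (by simp [h1])]
      rw [PySem.Dict.keys_modify]; exact PySem.Dict.nodup_keys_insert _ _ _ hd
    · rw [if_pos (by simpa [bne] using h1)]
      rw [PySem.Dict.keys_modify]
      apply PySem.Dict.nodup_keys_insert
      rw [PySem.Dict.keys_modify]
      exact PySem.Dict.nodup_keys_insert _ _ _ hd

theorem pv_getD_buckets (mm : List (Int × Int)) (v : Int) :
    (pvBuckets mm).getD v [] = pvBucketOf mm v := by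
  unfold pvBuckets pvBucketOf
  rw [pv_getD_bfold]
  simp

theorem pv_mem_keys_buckets (mm : List (Int × Int)) (v : Int) :
    v ∈ (pvBuckets mm).keys ↔ ∃ q ∈ PySem.List.enumerate mm, v = q.2.1 ∨ v = q.2.2 := by
  unfold pvBuckets
  rw [pv_mem_keys_bfold]
  simp

theorem pv_nodup_keys_buckets (mm : List (Int × Int)) : (pvBuckets mm).keys.Nodup := by
  unfold pvBuckets
  exact pv_nodup_keys_bfold _ _ PySem.Dict.nodup_keys_empty

-- (8a) membership in one block of pvBucketOf
theorem pv_mem_block (i a b v : Int) (q : Int × Int) :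
    q ∈ ((if a = v then [(i, b)] else []) ++ (if b = v ∧ b ≠ a then [(i, a)] else [])) ↔
      (a = v ∧ q = (i, b)) ∨ (b = v ∧ q = (i, a)) := by
  by_cases c3 : b = a
  · subst c3
    by_cases c1 : b = v <;> simp [c1]
  · by_cases c1 : a = v <;> by_cases c2 : b = v <;> simp [c1, c2, c3]
    exact fun _ h => c1 h.symm

-- (8) what an entry of bucket v says about mainMoves
theorem pv_mem_bucketOf (mm : List (Int × Int)) (v : Int) (q : Int × Int) :
    q ∈ pvBucketOf mm v ↔ ∃ (n : Nat) (_ : n < mm.length),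
      q.1 = (n : Int) ∧ ((mm[n].1 = v ∧ q.2 = mm[n].2) ∨ (mm[n].2 = v ∧ q.2 = mm[n].1)) := by
  unfold pvBucketOf
  rw [List.mem_flatMap]
  constructor
  · rintro ⟨bq, hb, hq⟩
    rw [PySem.List.mem_enumerate_iff] at hb
    obtain ⟨n, hn, rfl⟩ := hb
    have hq2 : q ∈ ((if mm[n].1 = v then [((0 : Int) + (n : Int), mm[n].2)] else []) ++
        (if mm[n].2 = v ∧ mm[n].2 ≠ mm[n].1 then [((0 : Int) + (n : Int), mm[n].1)] else [])) := hq
    rw [pv_mem_block] at hq2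
    refine ⟨n, hn, ?_⟩
    rcases hq2 with ⟨hv, rfl⟩ | ⟨hv, rfl⟩
    · exact ⟨by simp, Or.inl ⟨hv, rfl⟩⟩
    · exact ⟨by simp, Or.inr ⟨hv, rfl⟩⟩
  · rintro ⟨n, hn, hq1, hrest⟩
    refine ⟨((0 : Int) + (n : Int), mm[n]), ?_, ?_⟩
    · rw [PySem.List.mem_enumerate_iff]; exact ⟨n, hn, rfl⟩
    · show q ∈ ((if mm[n].1 = v then [((0 : Int) + (n : Int), mm[n].2)] else []) ++
        (if mm[n].2 = v ∧ mm[n].2 ≠ mm[n].1 then [((0 : Int) + (n : Int), mm[n].1)] else []))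
      rw [pv_mem_block]
      rcases hrest with ⟨hv, h2⟩ | ⟨hv, h2⟩
      · exact Or.inl ⟨hv, Prod.ext (by simpa using hq1) h2⟩
      · exact Or.inr ⟨hv, Prod.ext (by simpa using hq1) h2⟩

-- (9) bucket entries are listed in increasing index order
theorem pv_pairwise_bucketOf (mm : List (Int × Int)) (v : Int) :
    (pvBucketOf mm v).Pairwise (fun p q => p.1 < q.1) := by
  unfold pvBucketOf
  rw [List.pairwise_flatMap]
  constructor
  · intro a _
    by_cases c2 : a.2.2 = v ∧ a.2.2 ≠ a.2.1
    · have c1 : ¬ a.2.1 = v := fun h => c2.2 (c2.1.trans h.symm)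
      simp [c1, c2, show ¬ v = a.2.1 from fun h => c1 h.symm]
    · by_cases c1 : a.2.1 = v <;> simp [c1, c2]
  · have hpw := PySem.List.pairwise_lt_enumerate mm 0
    refine hpw.imp ?_
    intro a b hab x hx y hy
    have hx2 : x ∈ ((if a.2.1 = v then [(a.1, a.2.2)] else []) ++
        (if a.2.2 = v ∧ a.2.2 ≠ a.2.1 then [(a.1, a.2.1)] else [])) := hx
    have hy2 : y ∈ ((if b.2.1 = v then [(b.1, b.2.2)] else []) ++
        (if b.2.2 = v ∧ b.2.2 ≠ b.2.1 then [(b.1, b.2.1)] else [])) := hy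
    rw [pv_mem_block] at hx2 hy2
    have hxa : x.1 = a.1 := by rcases hx2 with ⟨_, rfl⟩ | ⟨_, rfl⟩ <;> rfl
    have hyb : y.1 = b.1 := by rcases hy2 with ⟨_, rfl⟩ | ⟨_, rfl⟩ <;> rfl
    rw [hxa, hyb]; exact hab

-- (10) two members with increasing indices sit at increasing positions
theorem pv_pos_of_mem_lt {entries : List (Int × Int)}
    (hpw : entries.Pairwise (fun p q => p.1 < q.1)) {p q : Int × Int}
    (hp : p ∈ entries) (hq : q ∈ entries) (hlt : p.1 < q.1) :
    ∃ (k l : Nat) (_ : k < entries.length) (_ : l < entries.length),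
      k < l ∧ entries[k] = p ∧ entries[l] = q := by
  obtain ⟨k, hk, hkp⟩ := List.mem_iff_getElem.1 hp
  obtain ⟨l, hl, hlq⟩ := List.mem_iff_getElem.1 hq
  have hkl : k < l := by
    rcases lt_trichotomy k l with h | h | h
    · exact h
    · exfalso; subst h; rw [hkp] at hlq; subst hlq; exact lt_irrefl _ hlt
    · exfalso
      have := List.pairwise_iff_getElem.1 hpw l k hl hk h
      rw [hkp, hlq] at this; exact absurd hlt (by omega)
  exact ⟨k, l, hk, hl, hkl, hkp, hlq⟩

-- (11) the two Boolean tests, as propositions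
theorem pv_linked_iff (mn : List (Int × Int)) (x y : Int) :
    pvLinked (PySem.Set.ofList mn) x y = true ↔ x ≠ y ∧ ((x, y) ∈ mn ∨ (y, x) ∈ mn) := by
  simp [pvLinked, PySem.Set.mem_ofList]

theorem pv_pvP_iff (mn : List (Int × Int)) (e f : Int × Int) :
    pvP mn e f = true ↔
      (e.1 = f.1 ∧ e.2 ≠ f.2 ∧ ((e.2, f.2) ∈ mn ∨ (f.2, e.2) ∈ mn)) ∨
      (e.2 = f.2 ∧ e.1 ≠ f.1 ∧ ((e.1, f.1) ∈ mn ∨ (f.1, e.1) ∈ mn)) ∨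
      (e.1 = f.2 ∧ e.2 ≠ f.1 ∧ ((e.2, f.1) ∈ mn ∨ (f.1, e.2) ∈ mn)) ∨
      (e.2 = f.1 ∧ e.1 ≠ f.2 ∧ ((e.1, f.2) ∈ mn ∨ (f.2, e.1) ∈ mn)) := by
  simp [pvP]; tauto

-- (12) a qualifying index pair is reported by some bucket
theorem pv_good_in_bucket (mm mn : List (Int × Int)) {i j : Nat}
    (hi : i < mm.length) (hj : j < mm.length) (hij : i < j) (v x y : Int)
    (hxi : (mm[i].1 = v ∧ x = mm[i].2) ∨ (mm[i].2 = v ∧ x = mm[i].1))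
    (hyj : (mm[j].1 = v ∧ y = mm[j].2) ∨ (mm[j].2 = v ∧ y = mm[j].1))
    (hlink : pvLinked (PySem.Set.ofList mn) x y = true) :
    ∃ e ∈ (pvBuckets mm).values, pvSB (PySem.Set.ofList mn) e ((i : Int), (j : Int)) := by
  refine ⟨pvBucketOf mm v, ?_, ?_⟩
  · rw [PySem.Dict.values_eq_map_keys _ (pv_nodup_keys_buckets mm) []]
    refine List.mem_map.2 ⟨v, ?_, pv_getD_buckets mm v⟩
    rw [pv_mem_keys_buckets]
    refine ⟨((0 : Int) + (i : Int), mm[i]), ?_, ?_⟩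
    · rw [PySem.List.mem_enumerate_iff]; exact ⟨i, hi, rfl⟩
    · rcases hxi with ⟨hv, _⟩ | ⟨hv, _⟩
      · exact Or.inl hv.symm
      · exact Or.inr hv.symm
  · have hmi : ((i : Int), x) ∈ pvBucketOf mm v := by
      rw [pv_mem_bucketOf]
      refine ⟨i, hi, rfl, ?_⟩
      rcases hxi with ⟨hv, hx⟩ | ⟨hv, hx⟩
      · exact Or.inl ⟨hv, hx⟩
      · exact Or.inr ⟨hv, hx⟩
    have hmj : ((j : Int), y) ∈ pvBucketOf mm v := by
      rw [pv_mem_bucketOf]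
      refine ⟨j, hj, rfl, ?_⟩
      rcases hyj with ⟨hv, hy⟩ | ⟨hv, hy⟩
      · exact Or.inl ⟨hv, hy⟩
      · exact Or.inr ⟨hv, hy⟩
    obtain ⟨k, l, hk, hl, hkl, hek, hel⟩ :=
      pv_pos_of_mem_lt (pv_pairwise_bucketOf mm v) hmi hmj
        (by show (i : Int) < (j : Int); exact_mod_cast hij)
    exact ⟨k, l, hk, hl, hkl, by rw [hek, hel]; exact hlink, by rw [hek, hel]⟩

-- (13) the counted set holds exactly the qualifying index pairs
theorem pv_mem_counted (mm mn : List (Int × Int)) (p : Int × Int) :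
    p ∈ (pvBuckets mm).values.foldl
        (fun s entries => pvScanBucket (PySem.Set.ofList mn) entries s) PySem.Set.empty ↔
      pvGoodPair mm mn p := by
  rw [pv_mem_foldl_scan]
  constructor
  · rintro (h | ⟨e, he, hsb⟩)
    · simp [PySem.Set.empty] at h
    · rw [PySem.Dict.values_eq_map_keys _ (pv_nodup_keys_buckets mm) []] at he
      obtain ⟨v, hv, rfl⟩ := List.mem_map.1 he
      rw [pv_getD_buckets] at hsb
      obtain ⟨k, l, hk, hl, hkl, hlink, rfl⟩ := hsb
      have hek := pv_mem_bucketOf mm v _ |>.1 (List.getElem_mem hk)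
      have hel := pv_mem_bucketOf mm v _ |>.1 (List.getElem_mem hl)
      obtain ⟨ni, hni, hi1, hidisj⟩ := hek
      obtain ⟨nj, hnj, hj1, hjdisj⟩ := hel
      have hij : ((pvBucketOf mm v)[k]).1 < ((pvBucketOf mm v)[l]).1 :=
        List.pairwise_iff_getElem.1 (pv_pairwise_bucketOf mm v) k l hk hl hkl
      have hnij : ni < nj := by rw [hi1, hj1] at hij; exact_mod_cast hij
      refine ⟨ni, nj, hni, hnj, hnij, ?_, by rw [hi1, hj1]⟩
      rw [pv_linked_iff] at hlink
      rw [pv_pvP_iff]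
      rcases hidisj with ⟨hvi, hxi⟩ | ⟨hvi, hxi⟩ <;> rcases hjdisj with ⟨hvj, hxj⟩ | ⟨hvj, hxj⟩
      · exact Or.inl ⟨hvi.trans hvj.symm, by rw [← hxi, ← hxj]; exact hlink.1,
          by rw [← hxi, ← hxj]; exact hlink.2⟩
      · exact Or.inr (Or.inr (Or.inl ⟨hvi.trans hvj.symm, by rw [← hxi, ← hxj]; exact hlink.1,
          by rw [← hxi, ← hxj]; exact hlink.2⟩))
      · exact Or.inr (Or.inr (Or.inr ⟨hvi.trans hvj.symm, by rw [← hxi, ← hxj]; exact hlink.1,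
          by rw [← hxi, ← hxj]; exact hlink.2⟩))
      · exact Or.inr (Or.inl ⟨hvi.trans hvj.symm, by rw [← hxi, ← hxj]; exact hlink.1,
          by rw [← hxi, ← hxj]; exact hlink.2⟩)
  · rintro ⟨i, j, hi, hj, hij, hP, rfl⟩
    right
    rw [pv_pvP_iff] at hP
    rcases hP with ⟨hv, hne, hmem⟩ | ⟨hv, hne, hmem⟩ | ⟨hv, hne, hmem⟩ | ⟨hv, hne, hmem⟩
    · exact pv_good_in_bucket mm mn hi hj hij mm[i].1 mm[i].2 mm[j].2
        (Or.inl ⟨rfl, rfl⟩) (Or.inl ⟨hv.symm, rfl⟩) (pv_linked_iff mn _ _ |>.2 ⟨hne, hmem⟩)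
    · exact pv_good_in_bucket mm mn hi hj hij mm[i].2 mm[i].1 mm[j].1
        (Or.inr ⟨rfl, rfl⟩) (Or.inr ⟨hv.symm, rfl⟩) (pv_linked_iff mn _ _ |>.2 ⟨hne, hmem⟩)
    · exact pv_good_in_bucket mm mn hi hj hij mm[i].1 mm[i].2 mm[j].1
        (Or.inl ⟨rfl, rfl⟩) (Or.inr ⟨hv.symm, rfl⟩) (pv_linked_iff mn _ _ |>.2 ⟨hne, hmem⟩)
    · exact pv_good_in_bucket mm mn hi hj hij mm[i].2 mm[i].1 mm[j].2
        (Or.inr ⟨rfl, rfl⟩) (Or.inl ⟨hv.symm, rfl⟩) (pv_linked_iff mn _ _ |>.2 ⟨hne, hmem⟩)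

def pvGP (mm mn : List (Int × Int)) : List (Int × Int) :=
  (PySem.List.pyRange 0 ((mm.length : Int) - 1) 1).flatMap (fun i =>
    ((PySem.List.pyRange (i + 1) (mm.length : Int) 1).filter (fun j =>
        pvP mn (PySem.List.pyGetD mm i (0, 0)) (PySem.List.pyGetD mm j (0, 0)))).map
      (fun j => (i, j)))

-- (14) the qualifying-pair list holds exactly the qualifying index pairs
theorem pv_mem_GP (mm mn : List (Int × Int)) (p : Int × Int) :
    p ∈ pvGP mm mn ↔ pvGoodPair mm mn p := by
  unfold pvGP pvGoodPair
  simp only [List.mem_flatMap, List.mem_map, List.mem_filter, PySem.List.mem_pyRange_one]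
  constructor
  · rintro ⟨i, ⟨hi0, hi1⟩, j, ⟨⟨hj0, hj1⟩, hP⟩, rfl⟩
    have hj0' : (0 : Int) ≤ j := by omega
    have hiN : i.toNat < mm.length := by omega
    have hjN : j.toNat < mm.length := by omega
    refine ⟨i.toNat, j.toNat, hiN, hjN, by omega, ?_, by simp [hi0, hj0']⟩
    rw [← Int.toNat_of_nonneg hi0, ← Int.toNat_of_nonneg hj0',
        PySem.List.pyGetD_natCast, PySem.List.pyGetD_natCast,
        List.getD_eq_getElem _ _ hiN, List.getD_eq_getElem _ _ hjN] at hP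
    exact hP
  · rintro ⟨i, j, hi, hj, hij, hP, rfl⟩
    refine ⟨(i : Int), ⟨by omega, by omega⟩, (j : Int), ⟨⟨by omega, by omega⟩, ?_⟩, rfl⟩
    rw [PySem.List.pyGetD_natCast, PySem.List.pyGetD_natCast,
        List.getD_eq_getElem _ _ hi, List.getD_eq_getElem _ _ hj]
    exact hP

-- (15) the qualifying-pair list has no duplicates
theorem pv_nodup_GP (mm mn : List (Int × Int)) : (pvGP mm mn).Nodup := by
  unfold pvGP
  rw [List.nodup_flatMap]
  constructor
  · intro i _
    refine List.Nodup.map ?_ (List.Nodup.filter _ (PySem.List.nodup_pyRange_one _ _))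
    intro a b h
    simpa using h
  · refine (PySem.List.pairwise_lt_pyRange_one _ _).imp ?_
    intro a b hab x hx hx'
    obtain ⟨_, _, rfl⟩ := List.mem_map.1 hx
    obtain ⟨_, _, h⟩ := List.mem_map.1 hx'
    have : b = a := congrArg Prod.fst h
    omega

-- (16) nodup of the counted set
theorem pv_nodup_counted (mm mn : List (Int × Int)) :
    ((pvBuckets mm).values.foldl
      (fun s entries => pvScanBucket (PySem.Set.ofList mn) entries s) PySem.Set.empty).Nodup :=
  pv_nodup_foldl_scan _ _ _ (by simp [PySem.Set.empty])

theorem pvB_eq_length (mm mn : List (Int × Int)) :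
    calcTwoAdjacentSides_alt mm mn = ((pvGP mm mn).length : Int) := by
  show PySem.Set.len ((pvBuckets mm).values.foldl
    (fun s entries => pvScanBucket (PySem.Set.ofList mn) entries s) PySem.Set.empty) = _
  have hperm : ((pvBuckets mm).values.foldl
      (fun s entries => pvScanBucket (PySem.Set.ofList mn) entries s) PySem.Set.empty).Perm
      (pvGP mm mn) :=
    (List.perm_ext_iff_of_nodup (pv_nodup_counted mm mn) (pv_nodup_GP mm mn)).2
      (fun p => (pv_mem_counted mm mn p).trans (pv_mem_GP mm mn p).symm)
  have hlen := hperm.length_eq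
  simp only [PySem.Set.len]
  exact_mod_cast hlen

theorem pvA_eq_length (mm mn : List (Int × Int)) :
    calcTwoAdjacentSides mm mn = ((pvGP mm mn).length : Int) := by
  unfold calcTwoAdjacentSides pvGP
  have h : ∀ (acc i : Int), i ∈ PySem.List.pyRange 0 ((mm.length : Int) - 1) →
      (PySem.List.pyRange (i + 1) (mm.length : Int)).foldl (fun counter j =>
        if ((PySem.List.pyGetD mm i (0, 0)).1 == (PySem.List.pyGetD mm j (0, 0)).1 && (PySem.List.pyGetD mm i (0, 0)).2 != (PySem.List.pyGetD mm j (0, 0)).2 && (mn.contains ((PySem.List.pyGetD mm i (0, 0)).2, (PySem.List.pyGetD mm j (0, 0)).2) || mn.contains ((PySem.List.pyGetD mm j (0, 0)).2, (PySem.List.pyGetD mm i (0, 0)).2)))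
        || ((PySem.List.pyGetD mm i (0, 0)).2 == (PySem.List.pyGetD mm j (0, 0)).2 && (PySem.List.pyGetD mm i (0, 0)).1 != (PySem.List.pyGetD mm j (0, 0)).1 && (mn.contains ((PySem.List.pyGetD mm i (0, 0)).1, (PySem.List.pyGetD mm j (0, 0)).1) || mn.contains ((PySem.List.pyGetD mm j (0, 0)).1, (PySem.List.pyGetD mm i (0, 0)).1)))
        || ((PySem.List.pyGetD mm i (0, 0)).1 == (PySem.List.pyGetD mm j (0, 0)).2 && (PySem.List.pyGetD mm i (0, 0)).2 != (PySem.List.pyGetD mm j (0, 0)).1 && (mn.contains ((PySem.List.pyGetD mm i (0, 0)).2, (PySem.List.pyGetD mm j (0, 0)).1) || mn.contains ((PySem.List.pyGetD mm j (0, 0)).1, (PySem.List.pyGetD mm i (0, 0)).2)))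
        || ((PySem.List.pyGetD mm i (0, 0)).2 == (PySem.List.pyGetD mm j (0, 0)).1 && (PySem.List.pyGetD mm i (0, 0)).1 != (PySem.List.pyGetD mm j (0, 0)).2 && (mn.contains ((PySem.List.pyGetD mm i (0, 0)).1, (PySem.List.pyGetD mm j (0, 0)).2) || mn.contains ((PySem.List.pyGetD mm j (0, 0)).2, (PySem.List.pyGetD mm i (0, 0)).1)))
        then counter + 1 else counter) acc
      = acc + (((PySem.List.pyRange (i + 1) (mm.length : Int)).countP (fun j =>
          pvP mn (PySem.List.pyGetD mm i (0, 0)) (PySem.List.pyGetD mm j (0, 0)))) : Int) := by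
    intro acc i _
    exact PySem.List.foldl_if_add_one
      (fun j => pvP mn (PySem.List.pyGetD mm i (0, 0)) (PySem.List.pyGetD mm j (0, 0))) _ acc
  rw [PySem.List.foldl_congr_mem _ _ _ _ h, PySem.List.foldl_add]
  simp [List.length_flatMap, List.countP_eq_length_filter, Function.comp_def]

-- ===== VERDICT (by name: the statement is the Claim_ definition above) =====
theorem calcTwoAdjacentSides_spec : Claim_equal_calcTwoAdjacentSides := by
  intro mm mn _
  unfold Spec_calcTwoAdjacentSides
  rw [pvA_eq_length, pvB_eq_length]
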